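-- pv_equiv track=rewrite | github.com/RichieHakim/basic_neural_processing_modules | bnpm/torch_helpers.py | unravel_index
-- ===== SOURCE A (Python) =====
-- from typing import Union, List, Tuple, Dict, Callable, Optional, Any, Iterable, Iterator, Generator
--
-- def unravel_index(
--     index: int,
--     shape: Tuple[int]
-- ) -> List[int]:
--     """
--     Converts a flat index into a coordinate in a tensor of certain shape.
--     RH 2022
--
--     Args:
--         index (int):
--             The flat index to be converted into a coordinate.
--         shape (Tuple[int]):
--             The shape of the tensor in which the coordinate is calculated.
--
--     Returns:
--         (List[int]):
--             coord (List[int]):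
--                 The coordinate in the tensor.
--     """
--     out = []
--     for dim in shape[::-1]:
--         out.append(index % dim)
--         index = index // dim
--     return tuple(out[::-1])
-- ===== SOURCE B (Python) =====
-- def unravel_index(index, shape):
--     """Stride table: stride[i] = product(shape[i+1:]); each coordinate is
--     computed independently as (index // stride[i]) % shape[i]."""
--     strides = []
--     p = 1
--     for d in reversed(shape):
--         strides.append(p)
--         p *= d
--     strides.reverse()
--     return tuple((index // s) % d for d, s in zip(shape, strides))
-- ===== Notes on version B (the rewrite author's own statement) =====
-- stated objective: alternative
-- what changed: Replaces A's sequential divide-and-carry loop (index mutated dimension by dimension, appended, reversed) by a precomputed suffix-product stride table, with each coordinate computed independently as (index // stride[i]) % shape[i].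
-- outside the precondition, e.g. on unravel_index(8, (3, -1, -3)): A returns (0, 0, -1), B returns (2, 0, -1); on unravel_index(5, (2, 0)): A raises ZeroDivisionError, B raises ZeroDivisionError
import Mathlib
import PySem

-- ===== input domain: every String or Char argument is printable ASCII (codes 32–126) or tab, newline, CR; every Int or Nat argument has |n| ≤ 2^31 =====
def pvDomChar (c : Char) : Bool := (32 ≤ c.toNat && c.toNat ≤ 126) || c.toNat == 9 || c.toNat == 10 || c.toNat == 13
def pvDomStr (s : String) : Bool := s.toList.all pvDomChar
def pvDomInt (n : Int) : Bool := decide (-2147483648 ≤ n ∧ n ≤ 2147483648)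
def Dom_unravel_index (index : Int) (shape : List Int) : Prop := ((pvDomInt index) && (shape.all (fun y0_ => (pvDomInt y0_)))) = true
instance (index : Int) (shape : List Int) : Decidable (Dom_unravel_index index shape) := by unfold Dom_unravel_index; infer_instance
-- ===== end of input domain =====

-- B replaces A's sequential divide-and-carry loop by a precomputed suffix-product stride
-- table with per-dimension coordinates (index // stride[i]) % shape[i]; equivalence is
-- proved for shapes with all dimensions positive (the natural domain of a tensor shape).
-- ===== PORT A =====
def unravel_index (index : Int) (shape : List Int) : List Int :=
  ((shape.reverse.foldl
      (fun (s : List Int × Int) dim =>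
        (s.1 ++ [PySem.Int.mod s.2 dim], PySem.Int.floordiv s.2 dim))
      ([], index)).1).reverse

-- ===== PORT B =====
-- Source B's reversed-walk building the stride list and the running suffix product,
-- as one structural recursion returning (strides, product).
def stridesOf : List Int → List Int × Int
  | [] => ([], 1)
  | d :: rest =>
      let s := stridesOf rest
      (s.2 :: s.1, d * s.2)

def unravel_index_alt (index : Int) (shape : List Int) : List Int :=
  (shape.zip (stridesOf shape).1).map
    (fun p => PySem.Int.mod (PySem.Int.floordiv index p.2) p.1)

-- ===== PRECONDITION & SPEC =====
-- Pre_ restricts to the natural domain of a shape: all dimensions positive. A dimension 0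
-- makes Python A raise ZeroDivisionError (B too); on negative dimensions — not a valid
-- tensor shape — A's values are an artefact of its successive floor division and B's
-- stride formula legitimately differs, so they are excluded as well.
def Pre_unravel_index (index : Int) (shape : List Int) : Prop := ∀ d ∈ shape, 0 < d
instance (index : Int) (shape : List Int) : Decidable (Pre_unravel_index index shape) := by
  unfold Pre_unravel_index; infer_instance
def pvWitness_unravel_index : Int × List Int := (5, [2, 3])

def Spec_unravel_index (index : Int) (shape : List Int) (out : List Int) : Prop := out = unravel_index_alt index shape
instance (index : Int) (shape : List Int) (out : List Int) : Decidable (Spec_unravel_index index shape out) := by unfold Spec_unravel_index; infer_instance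

-- ===== CLAIM =====
def Claim_equal_unravel_index : Prop := ∀ (index : Int) (shape : List Int), Dom_unravel_index index shape → Pre_unravel_index index shape → Spec_unravel_index index shape (unravel_index index shape)

-- ===== LEMMAS AND PROOFS =====
-- Reference form of A: successive division over the reversed shape.
def unravelGo (idx : Int) (rev : List Int) : List Int :=
  match rev with
  | [] => []
  | d :: rest => unravelGo (PySem.Int.floordiv idx d) rest ++ [PySem.Int.mod idx d]

-- idx successively floor-divided by every element of l, in order.
def fdivAll (idx : Int) : List Int → Int
  | [] => idx
  | d :: l => fdivAll (PySem.Int.floordiv idx d) l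

theorem unravel_foldl_eq (rev : List Int) (idx : Int) (acc : List Int) :
    (rev.foldl
      (fun (s : List Int × Int) dim =>
        (s.1 ++ [PySem.Int.mod s.2 dim], PySem.Int.floordiv s.2 dim))
      (acc, idx)).1 = acc ++ (unravelGo idx rev).reverse := by
  induction rev generalizing idx acc with
  | nil => simp [unravelGo]
  | cons d rest ih => simp [unravelGo, List.foldl, ih]

theorem unravelGo_append (l : List Int) (d : Int) (idx : Int) :
    unravelGo idx (l ++ [d]) =
      PySem.Int.mod (fdivAll idx l) d :: unravelGo idx l := by
  induction l generalizing idx with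
  | nil => simp [unravelGo, fdivAll]
  | cons e l ih => simp [unravelGo, fdivAll, ih]

theorem fdivAll_eq_floordiv_prod (l : List Int) (idx : Int) (h : ∀ d ∈ l, 0 < d) :
    fdivAll idx l = PySem.Int.floordiv idx l.prod := by
  induction l generalizing idx with
  | nil => simp [fdivAll, PySem.Int.floordiv]
  | cons e l ih =>
      have he : (0:Int) < e := h e (by simp)
      have hp : (0:Int) < l.prod := List.prod_pos (fun d hd => h d (by simp [hd]))
      rw [fdivAll, ih _ (fun d hd => h d (by simp [hd]))]
      rw [PySem.Int.floordiv_eq_ediv_of_pos he, PySem.Int.floordiv_eq_ediv_of_pos hp,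
        PySem.Int.floordiv_eq_ediv_of_pos (by simp [List.prod_cons]; positivity : (0:Int) < (e :: l).prod)]
      exact Int.ediv_ediv_of_nonneg (le_of_lt he)

theorem stridesOf_snd (l : List Int) : (stridesOf l).2 = l.prod := by
  induction l with
  | nil => simp [stridesOf]
  | cons d rest ih => simp [stridesOf, ih]

theorem unravelGo_eq_alt (shape : List Int) (idx : Int) (h : ∀ d ∈ shape, 0 < d) :
    unravelGo idx shape.reverse =
      (shape.zip (stridesOf shape).1).map
        (fun p => PySem.Int.mod (PySem.Int.floordiv idx p.2) p.1) := by
  induction shape with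
  | nil => simp [unravelGo, stridesOf]
  | cons d rest ih =>
      have hrev : ∀ e ∈ rest.reverse, (0:Int) < e := by
        intro e he; exact h e (by simp at he; simp [he])
      rw [List.reverse_cons, unravelGo_append,
        fdivAll_eq_floordiv_prod _ _ hrev, List.prod_reverse,
        ih (fun e he => h e (by simp [he]))]
      simp [stridesOf, stridesOf_snd]

-- ===== VERDICT =====
theorem unravel_index_spec : Claim_equal_unravel_index := by
  intro index shape _ hpre
  show unravel_index index shape = unravel_index_alt index shape
  unfold unravel_index unravel_index_alt
  rw [unravel_foldl_eq, List.nil_append, List.reverse_reverse,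
    unravelGo_eq_alt shape index hpre]
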